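-- pv_equiv track=rewrite | github.com/hajimaku/ima_no_jisho | scripts/update_backlog.py | ensure_screenshot_fields
-- ===== SOURCE A (Python) =====
-- def ensure_screenshot_fields(lines):
--     """全タスクに screenshot_path: null がなければ追加する"""
--     result = []
--     i = 0
--     while i < len(lines):
--         result.append(lines[i])
--         stripped = lines[i].strip()
--         if stripped.startswith('sns_hint:'):
--             # 次の行が screenshot_path でなければ追加
--             next_stripped = lines[i + 1].strip() if i + 1 < len(lines) else ''
--             if not next_stripped.startswith('screenshot_path:'):
--                 result.append('    screenshot_path: null\n')
--         i += 1
--     return result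
-- ===== SOURCE B (Python) =====
-- def ensure_screenshot_fields(lines):
--     """全タスクに screenshot_path: null がなければ追加する (lookbehind single pass)"""
--     SHOT = '    screenshot_path: null\n'
--     out = []
--     prev_sns = False
--     for line in lines:
--         s = line.strip()
--         if prev_sns and not s.startswith('screenshot_path:'):
--             out.append(SHOT)
--         out.append(line)
--         prev_sns = s.startswith('sns_hint:')
--     if prev_sns:
--         out.append(SHOT)
--     return out
-- ===== Notes on version B (the rewrite author's own statement) =====
-- stated objective: alternative
-- what changed: Replaced the indexed lookahead loop (peeking at lines[i+1] and stripping it each iteration) with a lookbehind single pass that carries a previous-line-was-sns_hint flag, strips each line once, and flushes the insertion after the loop for the end-of-list case.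
import Mathlib
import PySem

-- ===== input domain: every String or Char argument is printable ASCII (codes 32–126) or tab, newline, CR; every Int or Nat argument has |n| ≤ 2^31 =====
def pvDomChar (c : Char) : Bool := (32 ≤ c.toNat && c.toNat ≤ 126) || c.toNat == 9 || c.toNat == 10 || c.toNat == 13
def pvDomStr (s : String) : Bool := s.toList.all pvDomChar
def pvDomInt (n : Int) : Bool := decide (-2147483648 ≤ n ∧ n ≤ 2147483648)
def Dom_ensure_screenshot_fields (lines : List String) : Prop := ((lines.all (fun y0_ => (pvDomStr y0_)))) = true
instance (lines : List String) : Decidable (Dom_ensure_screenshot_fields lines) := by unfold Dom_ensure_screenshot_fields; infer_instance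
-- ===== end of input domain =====

-- B is an alternative decomposition: a lookbehind single pass with a previous-line flag instead of A's indexed lookahead peek at lines[i+1].

-- ===== PORT A =====
-- A walks the list by index, appending each line and, when its stripped value starts
-- with 'sns_hint:', peeking at the stripped NEXT line ('' past the end) to decide
-- whether to insert the screenshot line.  The index loop becomes structural recursion
-- where the next line is the head of the remaining list.
def ensure_screenshot_fields : List String → List String
  | [] => []
  | x :: rest =>
    let stripped := PySem.Str.strip x
    let ins :=
      if PySem.Str.startswith stripped "sns_hint:" then
        let next_stripped := match rest with
          | [] => ""
          | y :: _ => PySem.Str.strip y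
        if !(PySem.Str.startswith next_stripped "screenshot_path:") then
          ["    screenshot_path: null\n"]
        else []
      else []
    x :: (ins ++ ensure_screenshot_fields rest)

-- ===== PORT B =====
def shotLineB : String := "    screenshot_path: null\n"

-- one iteration of B's for-loop: state = (output so far, previous line started with 'sns_hint:')
def stepB (st : List String × Bool) (line : String) : List String × Bool :=
  let s := PySem.Str.strip line
  let out := if st.2 && !(PySem.Str.startswith s "screenshot_path:") then st.1 ++ [shotLineB] else st.1
  (out ++ [line], PySem.Str.startswith s "sns_hint:")

-- B's post-loop flush
def finishB (st : List String × Bool) : List String :=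
  if st.2 then st.1 ++ [shotLineB] else st.1

def ensure_screenshot_fields_alt (lines : List String) : List String :=
  finishB (lines.foldl stepB ([], false))

-- ===== PRECONDITION & SPEC =====
def Spec_ensure_screenshot_fields (lines : List String) (out : List String) : Prop := out = ensure_screenshot_fields_alt lines
instance (lines : List String) (out : List String) : Decidable (Spec_ensure_screenshot_fields lines out) := by unfold Spec_ensure_screenshot_fields; infer_instance

-- ===== CLAIM (what is proved, stated in full; the proofs are below) =====
def Claim_equal_ensure_screenshot_fields : Prop := ∀ (lines : List String), Dom_ensure_screenshot_fields lines → Spec_ensure_screenshot_fields lines (ensure_screenshot_fields lines)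

-- ===== LEMMAS AND PROOFS =====

-- the stripped 'next line' A peeks at: head of the remainder, '' at the end
def nextStrip : List String → String
  | [] => ""
  | y :: _ => PySem.Str.strip y

theorem foldB_finish (lines : List String) (acc : List String) (prev : Bool) :
    finishB (lines.foldl stepB (acc, prev)) =
      acc ++ (if prev && !(PySem.Str.startswith (nextStrip lines) "screenshot_path:")
              then [shotLineB] else []) ++ ensure_screenshot_fields lines := by
  induction lines generalizing acc prev with
  | nil =>
    cases prev <;> simp [finishB, ensure_screenshot_fields, nextStrip] <;> decide
  | cons x rest ih =>
    simp only [List.foldl_cons]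
    rw [show stepB (acc, prev) x =
        ((if prev && !(PySem.Str.startswith (PySem.Str.strip x) "screenshot_path:")
          then acc ++ [shotLineB] else acc) ++ [x],
         PySem.Str.startswith (PySem.Str.strip x) "sns_hint:") from rfl]
    rw [ih]
    simp only [ensure_screenshot_fields, nextStrip]
    cases rest <;> split_ifs <;> simp_all [nextStrip, shotLineB]

-- ===== VERDICT (by name: the statement is the Claim_ definition above) =====
theorem ensure_screenshot_fields_spec : Claim_equal_ensure_screenshot_fields := by
  intro lines _
  show ensure_screenshot_fields lines = ensure_screenshot_fields_alt lines
  rw [ensure_screenshot_fields_alt, foldB_finish]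
  simp
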